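-- pv_equiv track=rewrite | github.com/Eamon-fox/ln2-inventory-agent | scripts/validate.py | check_duplicate_ids
-- ===== SOURCE A (Python) =====
-- def check_duplicate_ids(records):
--     """Check for duplicate IDs."""
--     id_map = {}
--     errors = []
--
--     for idx, rec in enumerate(records):
--         rec_id = rec.get("id")
--         if rec_id is not None:
--             if rec_id in id_map:
--                 errors.append(
--                     f"重复的 ID {rec_id}: 记录 #{idx+1} 和记录 #{id_map[rec_id]+1}"
--                 )
--             else:
--                 id_map[rec_id] = idx
--
--     return errors
-- ===== SOURCE B (Python) =====
-- def check_duplicate_ids(records):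
--     """Check for duplicate IDs (two-pass: index first occurrences, then report)."""
--     first_occurrence = {}
--     for idx, rec in enumerate(records):
--         rec_id = rec.get("id")
--         if rec_id is not None and rec_id not in first_occurrence:
--             first_occurrence[rec_id] = idx
--
--     errors = []
--     for idx, rec in enumerate(records):
--         rec_id = rec.get("id")
--         if rec_id is not None:
--             first = first_occurrence.get(rec_id)
--             if first is not None and first < idx:
--                 errors.append(
--                     f"重复的 ID {rec_id}: 记录 #{idx+1} 和记录 #{first+1}"
--                 )
--     return errors
-- ===== Notes on version B (the rewrite author's own statement) =====
-- stated objective: alternative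
-- what changed: Replaces A's single pass with interleaved map-building and reporting by two separate O(n) passes: one building a first-occurrence index, one re-scanning the records to emit the duplicate errors.
import Mathlib
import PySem

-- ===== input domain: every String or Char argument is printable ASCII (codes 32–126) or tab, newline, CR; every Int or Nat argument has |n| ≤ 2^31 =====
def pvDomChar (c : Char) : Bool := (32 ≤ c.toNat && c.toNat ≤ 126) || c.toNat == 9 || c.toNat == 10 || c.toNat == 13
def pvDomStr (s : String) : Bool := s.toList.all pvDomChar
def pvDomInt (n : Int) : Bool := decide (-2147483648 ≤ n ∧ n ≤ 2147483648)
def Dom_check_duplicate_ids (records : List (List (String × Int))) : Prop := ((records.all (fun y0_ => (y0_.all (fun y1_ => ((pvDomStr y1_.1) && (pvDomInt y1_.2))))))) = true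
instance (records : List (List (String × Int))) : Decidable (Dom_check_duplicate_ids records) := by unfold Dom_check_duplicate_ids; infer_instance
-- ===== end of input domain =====

-- B differs from A by decomposition only: two separate passes instead of one interleaved pass.

-- rec.get("id") — assoc-list record read as a Python dict
def pvGetId (rec : List (String × Int)) : Option Int := (PySem.Dict.mk rec).get? "id"

-- the f-string both Pythons contain
def pvErr (rid idx first : Int) : String :=
  "重复的 ID " ++ PySem.Int.toStr rid ++ ": 记录 #" ++ PySem.Int.toStr (idx + 1)
    ++ " 和记录 #" ++ PySem.Int.toStr (first + 1)

-- ===== PORT A =====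
def goA (records : List (List (String × Int))) (idx : Int) (m : PySem.Dict Int Int)
    (errors : List String) : List String :=
  match records with
  | [] => errors
  | rec :: rest =>
    match pvGetId rec with
    | none => goA rest (idx + 1) m errors
    | some rid =>
      match m.get? rid with
      | some j => goA rest (idx + 1) m (errors ++ [pvErr rid idx j])
      | none => goA rest (idx + 1) (m.insert rid idx) errors

def check_duplicate_ids (records : List (List (String × Int))) : List String :=
  goA records 0 PySem.Dict.empty []

-- ===== PORT B =====
def firstPass (records : List (List (String × Int))) (idx : Int) (m : PySem.Dict Int Int) :
    PySem.Dict Int Int :=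
  match records with
  | [] => m
  | rec :: rest =>
    match pvGetId rec with
    | none => firstPass rest (idx + 1) m
    | some rid =>
      if m.contains rid then firstPass rest (idx + 1) m
      else firstPass rest (idx + 1) (m.insert rid idx)

def secondPass (records : List (List (String × Int))) (idx : Int) (first : PySem.Dict Int Int) :
    List String :=
  match records with
  | [] => []
  | rec :: rest =>
    (match pvGetId rec with
     | none => []
     | some rid =>
       match first.get? rid with
       | none => []
       | some j => if j < idx then [pvErr rid idx j] else []) ++ secondPass rest (idx + 1) first

def check_duplicate_ids_alt (records : List (List (String × Int))) : List String :=
  secondPass records 0 (firstPass records 0 PySem.Dict.empty)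

-- ===== PRECONDITION & SPEC =====
def Spec_check_duplicate_ids (records : List (List (String × Int))) (out : List String) : Prop := out = check_duplicate_ids_alt records
instance (records : List (List (String × Int))) (out : List String) : Decidable (Spec_check_duplicate_ids records out) := by unfold Spec_check_duplicate_ids; infer_instance

-- ===== CLAIM (what is proved, stated in full; the proofs are below) =====
def Claim_equal_check_duplicate_ids : Prop := ∀ (records : List (List (String × Int))), Dom_check_duplicate_ids records → Spec_check_duplicate_ids records (check_duplicate_ids records)

-- ===== LEMMAS AND PROOFS =====

-- firstPass never changes an entry that is already present
theorem firstPass_preserve (records : List (List (String × Int))) (idx : Int)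
    (m : PySem.Dict Int Int) (k v : Int) (h : m.get? k = some v) :
    (firstPass records idx m).get? k = some v := by
  induction records generalizing idx m with
  | nil => simpa [firstPass] using h
  | cons rec rest ih =>
    unfold firstPass
    cases hid : pvGetId rec with
    | none => exact ih _ _ h
    | some rid =>
      by_cases hc : m.contains rid = true
      · simp only [hc, if_true]; exact ih _ _ h
      · simp only [hc]
        apply ih
        have hne : k ≠ rid := by
          intro he; subst he
          rw [PySem.Dict.contains_eq_isSome_get?, h] at hc
          simp at hc
        rw [PySem.Dict.get?_insert_of_ne m idx hne]
        exact h

-- main loop invariant: A's interleaved pass equals B's report pass over the full index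
theorem goA_eq (records : List (List (String × Int))) (idx : Int)
    (m : PySem.Dict Int Int) (errors : List String)
    (hinv : ∀ k v, m.get? k = some v → v < idx) :
    goA records idx m errors = errors ++ secondPass records idx (firstPass records idx m) := by
  induction records generalizing idx m errors with
  | nil => simp [goA, secondPass]
  | cons rec rest ih =>
    unfold goA firstPass secondPass
    cases hid : pvGetId rec with
    | none =>
      show goA rest (idx + 1) m errors
          = errors ++ ([] ++ secondPass rest (idx + 1) (firstPass rest (idx + 1) m))
      rw [ih (idx + 1) m errors (fun k v h => by have := hinv k v h; omega)]
      simp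
    | some rid =>
      cases hg : m.get? rid with
      | some j =>
        have hc : m.contains rid = true := by
          rw [PySem.Dict.contains_eq_isSome_get?, hg]; rfl
        have hfull : (firstPass rest (idx + 1) m).get? rid = some j :=
          firstPass_preserve rest (idx + 1) m rid j hg
        have hj : j < idx := hinv _ _ hg
        simp only [hc, if_true, hg, hfull, hj]
        rw [ih (idx + 1) m (errors ++ [pvErr rid idx j])
              (fun k v h => by have := hinv k v h; omega)]
        simp
      | none =>
        have hc : m.contains rid = false := by
          rw [PySem.Dict.contains_eq_isSome_get?, hg]; rfl
        have hfull : (firstPass rest (idx + 1) (m.insert rid idx)).get? rid = some idx :=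
          firstPass_preserve rest (idx + 1) (m.insert rid idx) rid idx
            (PySem.Dict.get?_insert_self m rid idx)
        simp only [hc, Bool.false_eq_true, if_false, hg, hfull, lt_self_iff_false]
        rw [ih (idx + 1) (m.insert rid idx) errors ?_]
        · simp
        · intro k v h
          by_cases he : k = rid
          · subst he
            rw [PySem.Dict.get?_insert_self] at h
            injection h with h'
            omega
          · rw [PySem.Dict.get?_insert_of_ne m idx he] at h
            have := hinv _ _ h
            omega

-- ===== VERDICT (by name: the statement is the Claim_ definition above) =====
theorem check_duplicate_ids_spec : Claim_equal_check_duplicate_ids := by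
  intro records _
  unfold Spec_check_duplicate_ids check_duplicate_ids check_duplicate_ids_alt
  rw [goA_eq records 0 PySem.Dict.empty []
        (fun k v h => by simp [PySem.Dict.get?_empty] at h)]
  simp
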